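-- pv_equiv track=rewrite | github.com/MrHamdulay/csc3-capstone | examples/data/Assignment_8/vnklae001/question2.py | count
-- ===== SOURCE A (Python) =====
-- def count(s):
--     if len(s) < 2:      # If there are less than 2 letters there cannot be a pair
--         return 0
--     elif s[0] == s[1]:
--         return 1 + count(s[2:])     # If the characters are equal, add to counter and move on
--     elif len(s) > 2:
--         if s[1] == s[2]:        # Second possible combination of pairs
--             return 1 + count(s[2:])
--         else:
--             return count(s[2:])
--     else:
--         return count(s[2:])     # Else move on
-- ===== SOURCE B (Python) =====
-- def count(s):
--     n = len(s)
--     c = 0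
--     i = 0
--     while i + 1 < n:
--         if s[i] == s[i+1]:
--             c += 1
--         elif i + 2 < n and s[i+1] == s[i+2]:
--             c += 1
--         i += 2
--     return c
-- ===== Notes on version B (the rewrite author's own statement) =====
-- stated objective: faster
-- what changed: Replaced the O(n^2) recursion that allocates a slice s[2:] at every step with a single O(n) index loop stepping by 2 and reading s[i], s[i+1], s[i+2] directly.
import Mathlib
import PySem

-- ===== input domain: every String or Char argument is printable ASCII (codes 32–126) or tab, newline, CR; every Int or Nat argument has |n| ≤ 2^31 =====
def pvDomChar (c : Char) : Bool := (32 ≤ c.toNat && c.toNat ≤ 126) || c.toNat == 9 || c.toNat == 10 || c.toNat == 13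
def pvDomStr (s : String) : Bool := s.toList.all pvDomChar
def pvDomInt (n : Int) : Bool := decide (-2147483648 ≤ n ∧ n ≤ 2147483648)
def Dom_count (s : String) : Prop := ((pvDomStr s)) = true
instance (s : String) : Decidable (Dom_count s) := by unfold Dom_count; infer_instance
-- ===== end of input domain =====

-- B replaces A's slice-per-step recursion with a single index loop stepping by 2 (faster, asymptotic in a timing run).

-- ===== PORT A =====
-- A's recursion on the string, step for step: len(s)<2 → 0; s[0]==s[1] → 1+count(s[2:]);
-- len(s)>2 and s[1]==s[2] → 1+count(s[2:]); else count(s[2:]).  s[2:] is the structural tail-of-tail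
-- (exact for in-range nonneg slice), so the recursion is over List Char.
def countA : List Char → Int
  | [] => 0
  | [_] => 0
  | a :: b :: rest =>
    if a = b then 1 + countA rest
    else
      match rest with
      | c :: _ => if b = c then 1 + countA rest else countA rest
      | [] => countA rest

def count (s : String) : Int := countA s.toList

-- ===== PORT B =====
-- B's while loop: index i from 0 by 2, accumulator c; reads l[i], l[i+1], l[i+2] in place.
def countB (l : List Char) (i : Nat) (c : Int) : Int :=
  if h : i + 1 < l.length then
    let c' : Int :=
      if l[i]'(by omega) = l[i+1]'h then c + 1
      else if h2 : i + 2 < l.length then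
        if l[i+1]'h = l[i+2]'h2 then c + 1 else c
      else c
    countB l (i + 2) c'
  else c
termination_by l.length - i

def count_alt (s : String) : Int := countB s.toList 0 0

-- ===== PRECONDITION & SPEC =====
def Spec_count (s : String) (out : Int) : Prop := out = count_alt s
instance (s : String) (out : Int) : Decidable (Spec_count s out) := by unfold Spec_count; infer_instance

-- ===== CLAIM (what is proved, stated in full; the proofs are below) =====
def Claim_equal_count : Prop := ∀ (s : String), Dom_count s → Spec_count s (count s)

-- ===== LEMMAS AND PROOFS =====

theorem countA_short (l : List Char) (h : l.length ≤ 1) : countA l = 0 := by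
  match l with
  | [] => rfl
  | [_] => rfl
  | _ :: _ :: _ => simp at h

theorem countB_eq (l : List Char) (i : Nat) (c : Int) :
    countB l i c = c + countA (l.drop i) := by
  by_cases h : i + 1 < l.length
  · have hd : l.drop i = l[i]'(by omega) :: l[i+1]'h :: l.drop (i + 2) := by
      rw [List.drop_eq_getElem_cons (by omega)]
      congr 1
      rw [List.drop_eq_getElem_cons (by omega)]
    rw [countB]
    simp only [h, dif_pos]
    rw [countB_eq l (i + 2)]
    rw [hd]
    by_cases hab : l[i]'(by omega) = l[i+1]'h
    · simp only [countA, hab, if_pos]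
      ring
    · by_cases h2 : i + 2 < l.length
      · have hd2 : l.drop (i + 2) = l[i+2]'h2 :: l.drop (i + 3) := by
          rw [List.drop_eq_getElem_cons h2]
        rw [hd2]
        simp only [countA, if_neg hab, dif_pos h2]
        by_cases hbc : l[i+1]'h = l[i+2]'h2
        · simp only [if_pos hbc]; ring
        · simp only [if_neg hbc]
      · have hd2 : l.drop (i + 2) = [] := by
          apply List.drop_eq_nil_of_le; omega
        rw [hd2]
        simp only [countA, if_neg hab, dif_neg h2]
  · rw [countB]
    simp only [h, dif_neg, not_false_iff]
    have : countA (l.drop i) = 0 := by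
      apply countA_short
      simp only [List.length_drop]
      omega
    omega
termination_by l.length - i

-- ===== VERDICT (by name: the statement is the Claim_ definition above) =====
theorem count_spec : Claim_equal_count := by
  intro s _
  unfold Spec_count count count_alt
  rw [countB_eq]
  simp
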